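-- pv_equiv track=rewrite | github.com/Dunit05/Intro-to-Computer-Science-CSCI-1030U-Lecture-Notes | Study Files/Exam/dc_find.py | dc_find
-- ===== SOURCE A (Python) =====
-- def dc_find(elements, value):
--     if len(elements) == 0:
--         return False
--     else:
--         middle = len(elements) // 2
--         if elements[middle] == value:
--             return True
--         else:
--             return dc_find(elements[:middle], value) or dc_find(
--                 elements[middle + 1 :], value
--             )
-- ===== SOURCE B (Python) =====
-- def dc_find(elements, value):
--     for x in elements:
--         if x == value:
--             return True
--     return False
-- ===== Notes on version B (the rewrite author's own statement) =====
-- stated objective: simpler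
-- what changed: Replaced the divide-and-conquer recursion (middle element check plus two recursive calls on list slices) with a single iterative left-to-right scan that returns on the first match; no slicing, no recursion.
import Mathlib
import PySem

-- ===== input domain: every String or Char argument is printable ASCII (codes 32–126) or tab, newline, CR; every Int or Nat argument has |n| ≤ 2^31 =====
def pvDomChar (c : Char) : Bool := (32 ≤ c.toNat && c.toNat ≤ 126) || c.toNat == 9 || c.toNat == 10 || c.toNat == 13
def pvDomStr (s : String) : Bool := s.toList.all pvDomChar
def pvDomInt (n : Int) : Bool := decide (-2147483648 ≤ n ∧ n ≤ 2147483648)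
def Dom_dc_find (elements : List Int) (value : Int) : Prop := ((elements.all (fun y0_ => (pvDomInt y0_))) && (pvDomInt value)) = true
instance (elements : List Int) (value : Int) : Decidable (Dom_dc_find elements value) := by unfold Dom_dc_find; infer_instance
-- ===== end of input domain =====

-- B replaces A's divide-and-conquer slice recursion with a single iterative scan (simpler decomposition).


-- ===== PORT A =====
def dc_find (elements : List Int) (value : Int) : Bool :=
  if elements.length = 0 then false
  else
    let middle := elements.length / 2
    if PySem.List.pyGetD elements (middle : Int) 0 = value then true
    else dc_find (PySem.List.slice elements none (some (middle : Int))) value ||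
         dc_find (PySem.List.slice elements (some ((middle : Int) + 1)) none) value
termination_by elements.length
decreasing_by
  · simp only [PySem.List.slice_to_natCast, List.length_take]
    omega
  · have : ((elements.length / 2 : Nat) : Int) + 1 = ((elements.length / 2 + 1 : Nat) : Int) := by push_cast; ring
    rw [this, PySem.List.slice_from_natCast]
    simp only [List.length_drop]
    omega

-- ===== PORT B =====
def dc_find_alt (elements : List Int) (value : Int) : Bool :=
  match elements with
  | [] => false
  | x :: rest => if x = value then true else dc_find_alt rest value

-- ===== PRECONDITION & SPEC =====
def Spec_dc_find (elements : List Int) (value : Int) (out : Bool) : Prop := out = dc_find_alt elements value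
instance (elements : List Int) (value : Int) (out : Bool) : Decidable (Spec_dc_find elements value out) := by unfold Spec_dc_find; infer_instance

-- ===== CLAIM (what is proved, stated in full; the proofs are below) =====
def Claim_equal_dc_find : Prop := ∀ (elements : List Int) (value : Int), Dom_dc_find elements value → Spec_dc_find elements value (dc_find elements value)

-- ===== LEMMAS AND PROOFS =====

theorem dc_find_alt_eq_mem (elements : List Int) (value : Int) :
    dc_find_alt elements value = decide (value ∈ elements) := by
  induction elements with
  | nil => simp [dc_find_alt]
  | cons x rest ih =>
    simp [dc_find_alt, ih]
    by_cases h : x = value <;> simp [h, eq_comm]; tauto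

theorem dc_find_eq_mem : ∀ (n : Nat) (elements : List Int) (value : Int),
    elements.length = n → dc_find elements value = decide (value ∈ elements) := by
  intro n
  induction n using Nat.strong_induction_on with
  | _ n ih =>
    intro xs v hlen
    rw [dc_find]
    by_cases h0 : xs.length = 0
    · simp [List.length_eq_zero_iff.mp h0]
    · simp only [h0, if_false]
      have hm : xs.length / 2 < xs.length := by omega
      have hget : PySem.List.pyGetD xs ((xs.length / 2 : Nat) : Int) 0 = xs[xs.length / 2] :=
        PySem.List.pyGetD_ofNat xs _ 0 hm
      have hcast : ((xs.length / 2 : Nat) : Int) + 1 = ((xs.length / 2 + 1 : Nat) : Int) := by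
        push_cast; ring
      rw [hget, PySem.List.slice_to_natCast, hcast, PySem.List.slice_from_natCast]
      rw [ih _ (by simp; omega) _ v rfl, ih _ (by simp; omega) _ v rfl]
      have hsplit : v ∈ xs ↔ v ∈ xs.take (xs.length / 2) ∨ v = xs[xs.length / 2] ∨
          v ∈ xs.drop (xs.length / 2 + 1) := by
        have hx : xs.take (xs.length / 2) ++ xs[xs.length / 2] :: xs.drop (xs.length / 2 + 1) = xs := by
          rw [← List.drop_eq_getElem_cons hm, List.take_append_drop]
        conv_lhs => rw [← hx]
        simp only [List.mem_append, List.mem_cons]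
      by_cases heq : xs[xs.length / 2] = v
      · simp [heq, hsplit]
      · have : v ≠ xs[xs.length / 2] := fun h => heq h.symm
        simp [heq, hsplit, this]

-- ===== VERDICT (by name: the statement is the Claim_ definition above) =====
theorem dc_find_spec : Claim_equal_dc_find := by
  intro elements value _
  unfold Spec_dc_find
  rw [dc_find_alt_eq_mem, dc_find_eq_mem elements.length elements value rfl]
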